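-- pv_equiv track=rewrite | github.com/alexadamm/SPARS-AIBT-2025 | SPARS/Simulator/Algo/easy_mcf.py | _make_flow_consistent
-- ===== SOURCE A (Python) =====
-- def _make_flow_consistent(flow_dict, m, n, time_points):
--     """
--     Modify flow to ensure it corresponds to a valid schedule.
--     This implements the flow modification procedure from Section 3.2 of Albers (2019).
--
--     Key insight: An arbitrary min-cost flow may have a server in both upper
--     and lower paths simultaneously, which is physically impossible.
--     """
--     modified_flow = {}
--
--     for i in range(m):
--         # track which path the server takes through time
--         server_path = []  # list of 'upper' or 'lower' for each time point
--
--         # determine initial path from source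
--         if flow_dict.get("a0", {}).get(f"u_{i},0", 0) > 0.5:
--             current_path = 'upper'
--         else:
--             current_path = 'lower'
--         server_path.append(current_path)
--
--         # trace path through the network
--         for k in range(n - 1):
--             # check for state transitions
--             if current_path == 'lower':
--                 # check for power-up transition
--                 if flow_dict.get(f"l_{i},{k}", {}).get(f"u_{i},{k}", 0) > 0.5:
--                     current_path = 'upper'
--             else:
--                 # check for power-down transition
--                 if flow_dict.get(f"u_{i},{k+1}", {}).get(f"l_{i},{k+1}", 0) > 0.5:
--                     current_path = 'lower'
--
--             server_path.append(current_path)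
--
--         # rebuild consistent flow for this server
--         for k in range(n):
--             if server_path[k] == 'upper':
--                 # flow goes through upper path
--                 if k == 0:
--                     modified_flow.setdefault("a0", {})[f"u_{i},0"] = 1
--                 if k < n - 1:
--                     modified_flow.setdefault(f"u_{i},{k}", {})[f"u_{i},{k+1}"] = 1
--                 if k == n - 1:
--                     modified_flow.setdefault(f"u_{i},{n-1}", {})["b0"] = 1
--
--                 # add transitions
--                 if k > 0 and server_path[k-1] == 'lower':
--                     # power-up transition
--                     modified_flow.setdefault(f"l_{i},{k}", {})[f"u_{i},{k}"] = 1
--                 if k < n - 1 and server_path[k+1] == 'lower':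
--                     # power-down transition
--                     modified_flow.setdefault(f"u_{i},{k+1}", {})[f"l_{i},{k+1}"] = 1
--
--             else:
--                 # lower path
--                 if k == 0:
--                     modified_flow.setdefault("a0", {})[f"l_{i},0"] = 1
--                 if k < n - 1:
--                     modified_flow.setdefault(f"l_{i},{k}", {})[f"la_{i},{k}"] = 1
--                     modified_flow.setdefault(f"la_{i},{k}", {})[f"lb_{i},{k}"] = 1
--                     modified_flow.setdefault(f"lb_{i},{k}", {})[f"l_{i},{k+1}"] = 1
--
--                     # handle demand edges if server is in lower path
--                     d_k = flow_dict.get(f"ak{k}", {}).get(f"la_{i},{k}", 0)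
--                     if d_k > 0:
--                         modified_flow.setdefault(f"ak{k}", {})[f"la_{i},{k}"] = 1
--                         modified_flow.setdefault(f"lb_{i},{k}", {})[f"bk{k}"] = 1
--
--                 if k == n - 1:
--                     modified_flow.setdefault(f"l_{i},{n-1}", {})["b0"] = 1
--
--     return modified_flow
-- ===== SOURCE B (Python) =====
-- def _make_flow_consistent(flow_dict, m, n, time_points):
--     """Single pass per server: carry (prev, up) state instead of building a
--     server_path list first; emit all edges as a stream, then build the nested
--     dict in one final fold."""
--
--     def val(a, b):
--         return flow_dict.get(a, {}).get(b, 0)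
--
--     def edges():
--         for i in range(m):
--             up = val("a0", f"u_{i},0") > 0.5
--             prev = None
--             for k in range(n):
--                 if k < n - 1:
--                     if up:
--                         nxt = not (val(f"u_{i},{k+1}", f"l_{i},{k+1}") > 0.5)
--                     else:
--                         nxt = val(f"l_{i},{k}", f"u_{i},{k}") > 0.5
--                 else:
--                     nxt = None
--                 if up:
--                     if k == 0:
--                         yield ("a0", f"u_{i},0")
--                     if k < n - 1:
--                         yield (f"u_{i},{k}", f"u_{i},{k+1}")
--                     if k == n - 1:
--                         yield (f"u_{i},{n-1}", "b0")
--                     if k > 0 and prev is False: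
--                         yield (f"l_{i},{k}", f"u_{i},{k}")
--                     if k < n - 1 and nxt is False:
--                         yield (f"u_{i},{k+1}", f"l_{i},{k+1}")
--                 else:
--                     if k == 0:
--                         yield ("a0", f"l_{i},0")
--                     if k < n - 1:
--                         yield (f"l_{i},{k}", f"la_{i},{k}")
--                         yield (f"la_{i},{k}", f"lb_{i},{k}")
--                         yield (f"lb_{i},{k}", f"l_{i},{k+1}")
--                         if val(f"ak{k}", f"la_{i},{k}") > 0:
--                             yield (f"ak{k}", f"la_{i},{k}")
--                             yield (f"lb_{i},{k}", f"bk{k}")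
--                     if k == n - 1:
--                         yield (f"l_{i},{n-1}", "b0")
--                 prev, up = up, nxt
--
--     out = {}
--     for a, b in edges():
--         out.setdefault(a, {})[b] = 1
--     return out
-- ===== Notes on version B (the rewrite author's own statement) =====
-- stated objective: alternative
-- what changed: B replaces A's two-phase per-server processing (first trace and materialise the whole server_path list, then a second loop that rebuilds the flow by random-access indexing into that list) with a single pass per server that carries only the (prev, current) path state and a one-step lookahead, emits all edges as one flat stream, and builds the nested dict in one final fold over that stream.
import Mathlib
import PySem

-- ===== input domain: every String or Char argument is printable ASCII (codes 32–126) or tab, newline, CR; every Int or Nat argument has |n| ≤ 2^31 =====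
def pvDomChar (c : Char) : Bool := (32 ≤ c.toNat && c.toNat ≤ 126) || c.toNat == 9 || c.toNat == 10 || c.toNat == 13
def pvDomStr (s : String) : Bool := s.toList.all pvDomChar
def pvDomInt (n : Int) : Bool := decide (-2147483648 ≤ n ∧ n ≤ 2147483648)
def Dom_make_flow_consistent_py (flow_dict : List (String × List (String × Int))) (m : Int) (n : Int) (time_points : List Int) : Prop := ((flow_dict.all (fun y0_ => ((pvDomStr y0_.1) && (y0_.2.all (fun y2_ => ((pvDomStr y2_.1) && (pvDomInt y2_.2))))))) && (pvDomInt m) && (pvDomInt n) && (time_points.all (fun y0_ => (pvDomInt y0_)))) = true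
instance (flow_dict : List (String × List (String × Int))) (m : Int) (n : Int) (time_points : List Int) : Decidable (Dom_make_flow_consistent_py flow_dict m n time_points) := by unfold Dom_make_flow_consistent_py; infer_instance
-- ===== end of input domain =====

-- B replaces A's two-phase per-server pass (build server_path, then rebuild by indexing it)
-- with a single stateful pass emitting an edge stream, folded once into the dict (objective: alternative).

-- ===== PORT A =====
-- f-string helpers shared by both ports (ports of the same f-string expressions)
def uName (i k : Int) : String := "u_" ++ PySem.Int.toStr i ++ "," ++ PySem.Int.toStr k
def lName (i k : Int) : String := "l_" ++ PySem.Int.toStr i ++ "," ++ PySem.Int.toStr k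
def laName (i k : Int) : String := "la_" ++ PySem.Int.toStr i ++ "," ++ PySem.Int.toStr k
def lbName (i k : Int) : String := "lb_" ++ PySem.Int.toStr i ++ "," ++ PySem.Int.toStr k
def akName (k : Int) : String := "ak" ++ PySem.Int.toStr k
def bkName (k : Int) : String := "bk" ++ PySem.Int.toStr k

-- flow_dict.get(a, {}).get(b, 0)   (int values; `v > 0.5` on an int is exactly `0 < v`)
def fget (fd : List (String × List (String × Int))) (a b : String) : Int :=
  (PySem.Dict.mk ((PySem.Dict.mk fd).getD a [])).getD b 0

-- modified_flow.setdefault(a, {})[b] = 1  (both Pythons perform exactly this update)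
def setd (d : PySem.Dict String (PySem.Dict String Int)) (a b : String) :
    PySem.Dict String (PySem.Dict String Int) :=
  d.insert a ((d.getD a (PySem.Dict.mk [])).insert b 1)

-- body of A's trace loop: update current_path, append to server_path
def aPathStep (fd : List (String × List (String × Int))) (i : Int)
    (st : List String × String) (k : Int) : List String × String :=
  let cur := st.2
  let cur' :=
    if cur = "lower" then
      (if 0 < fget fd (lName i k) (uName i k) then "upper" else cur)
    else
      (if 0 < fget fd (uName i (k+1)) (lName i (k+1)) then "lower" else cur)
  (st.1 ++ [cur'], cur')

-- body of A's rebuild loop at index k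
def aEmit (fd : List (String × List (String × Int))) (i n : Int) (sp : List String)
    (d : PySem.Dict String (PySem.Dict String Int)) (k : Int) :
    PySem.Dict String (PySem.Dict String Int) :=
  if PySem.List.pyGetD sp k "" = "upper" then
    let d := if k = 0 then setd d "a0" (uName i 0) else d
    let d := if k < n - 1 then setd d (uName i k) (uName i (k+1)) else d
    let d := if k = n - 1 then setd d (uName i (n-1)) "b0" else d
    let d := if 0 < k ∧ PySem.List.pyGetD sp (k-1) "" = "lower" then setd d (lName i k) (uName i k) else d
    if k < n - 1 ∧ PySem.List.pyGetD sp (k+1) "" = "lower" then setd d (uName i (k+1)) (lName i (k+1)) else d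
  else
    let d := if k = 0 then setd d "a0" (lName i 0) else d
    let d :=
      if k < n - 1 then
        let d := setd d (lName i k) (laName i k)
        let d := setd d (laName i k) (lbName i k)
        let d := setd d (lbName i k) (lName i (k+1))
        if 0 < fget fd (akName k) (laName i k) then
          setd (setd d (akName k) (laName i k)) (lbName i k) (bkName k)
        else d
      else d
    if k = n - 1 then setd d (lName i (n-1)) "b0" else d

-- one iteration of A's outer `for i in range(m)` loop
def aServer (fd : List (String × List (String × Int))) (n : Int)
    (d : PySem.Dict String (PySem.Dict String Int)) (i : Int) :
    PySem.Dict String (PySem.Dict String Int) :=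
  let cur0 := if 0 < fget fd "a0" (uName i 0) then "upper" else "lower"
  let sp := ((PySem.List.pyRange 0 (n-1) 1).foldl (aPathStep fd i) ([cur0], cur0)).1
  (PySem.List.pyRange 0 n 1).foldl (aEmit fd i n sp) d

def make_flow_consistent_py (flow_dict : List (String × List (String × Int))) (m : Int) (n : Int) (time_points : List Int) : List (String × List (String × Int)) :=
  (((PySem.List.pyRange 0 m 1).foldl (aServer flow_dict n) (PySem.Dict.mk [])).items.map
    (fun p => (p.1, p.2.items)))

-- ===== PORT B =====
-- next path state (B's lookahead), `None` past the last step
def bNext (fd : List (String × List (String × Int))) (i n k : Int) (up : Option Bool) : Option Bool :=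
  if k < n - 1 then
    if up = some true then some (!(decide (0 < fget fd (uName i (k+1)) (lName i (k+1)))))
    else some (decide (0 < fget fd (lName i k) (uName i k)))
  else none

-- edges yielded at step k given (prev, up, nxt)
def bEdges (fd : List (String × List (String × Int))) (i n k : Int)
    (prev up nxt : Option Bool) : List (String × String) :=
  if up = some true then
    (if k = 0 then [("a0", uName i 0)] else []) ++
    (if k < n - 1 then [(uName i k, uName i (k+1))] else []) ++
    (if k = n - 1 then [(uName i (n-1), "b0")] else []) ++
    (if 0 < k ∧ prev = some false then [(lName i k, uName i k)] else []) ++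
    (if k < n - 1 ∧ nxt = some false then [(uName i (k+1), lName i (k+1))] else [])
  else
    (if k = 0 then [("a0", lName i 0)] else []) ++
    (if k < n - 1 then
      [(lName i k, laName i k), (laName i k, lbName i k), (lbName i k, lName i (k+1))] ++
      (if 0 < fget fd (akName k) (laName i k) then [(akName k, laName i k), (lbName i k, bkName k)] else [])
    else []) ++
    (if k = n - 1 then [(lName i (n-1), "b0")] else [])

-- the edge stream of one server: single pass carrying (acc, prev, up)
def bServer (fd : List (String × List (String × Int))) (n i : Int) : List (String × String) :=
  let up0 := decide (0 < fget fd "a0" (uName i 0))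
  ((PySem.List.pyRange 0 n 1).foldl
    (fun st k =>
      let nxt := bNext fd i n k st.2.2
      (st.1 ++ bEdges fd i n k st.2.1 st.2.2 nxt, st.2.2, nxt))
    (([] : List (String × String)), (none : Option Bool), some up0)).1

def make_flow_consistent_py_alt (flow_dict : List (String × List (String × Int))) (m : Int) (n : Int) (time_points : List Int) : List (String × List (String × Int)) :=
  ((((PySem.List.pyRange 0 m 1).foldl (fun acc i => acc ++ bServer flow_dict n i) []).foldl
      (fun d e => setd d e.1 e.2) (PySem.Dict.mk [])).items.map
    (fun p => (p.1, p.2.items)))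

-- ===== PRECONDITION & SPEC =====
def Spec_make_flow_consistent_py (flow_dict : List (String × List (String × Int))) (m : Int) (n : Int) (time_points : List Int) (out : List (String × List (String × Int))) : Prop := out = make_flow_consistent_py_alt flow_dict m n time_points
instance (flow_dict : List (String × List (String × Int))) (m : Int) (n : Int) (time_points : List Int) (out : List (String × List (String × Int))) : Decidable (Spec_make_flow_consistent_py flow_dict m n time_points out) := by unfold Spec_make_flow_consistent_py; infer_instance

-- ===== CLAIM (what is proved, stated in full; the proofs are below) =====
def Claim_equal_make_flow_consistent_py : Prop := ∀ (flow_dict : List (String × List (String × Int))) (m : Int) (n : Int) (time_points : List Int), Dom_make_flow_consistent_py flow_dict m n time_points → Spec_make_flow_consistent_py flow_dict m n time_points (make_flow_consistent_py flow_dict m n time_points)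

-- ===== LEMMAS AND PROOFS =====

-- proof-only helpers: the abstract state sequence of one server
def sf (fd : List (String × List (String × Int))) (i : Int) (b : Bool) (k : Int) : Bool :=
  if b then !(decide (0 < fget fd (uName i (k+1)) (lName i (k+1))))
  else decide (0 < fget fd (lName i k) (uName i k))

def stF (fd : List (String × List (String × Int))) (i : Int) (up0 : Bool) : Nat → Bool
  | 0 => up0
  | j+1 => sf fd i (stF fd i up0 j) j

def strOf (b : Bool) : String := if b then "upper" else "lower"

def prevOf (fd : List (String × List (String × Int))) (i : Int) (up0 : Bool) (a : Nat) : Option Bool :=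
  if a = 0 then none else some (stF fd i up0 (a-1))

-- the edge stream from step a on, with fuel t
def Efrom (fd : List (String × List (String × Int))) (i n : Int) (up0 : Bool) :
    Nat → Nat → List (String × String)
  | 0, _ => []
  | t+1, a =>
      bEdges fd i n a (prevOf fd i up0 a) (some (stF fd i up0 a))
        (bNext fd i n a (some (stF fd i up0 a))) ++ Efrom fd i n up0 t (a+1)

lemma bNext_some (fd : List (String × List (String × Int))) (i n k : Int) (b : Bool) :
    bNext fd i n k (some b) = if k < n - 1 then some (sf fd i b k) else none := by
  cases b <;> simp [bNext, sf]

lemma aPathStep_strOf (fd : List (String × List (String × Int))) (i : Int)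
    (pre : List String) (b : Bool) (k : Int) :
    aPathStep fd i (pre, strOf b) k = (pre ++ [strOf (sf fd i b k)], strOf (sf fd i b k)) := by
  cases b <;> simp [aPathStep, strOf, sf] <;> split <;> simp_all

lemma path_fold (fd : List (String × List (String × Int))) (i : Int) (up0 : Bool) (b : Int) :
    ∀ (t a : Nat), (b - (a:Int)).toNat = t → ∀ (pre : List String),
      (PySem.List.pyRange a b 1).foldl (aPathStep fd i) (pre, strOf (stF fd i up0 a))
        = (pre ++ (List.range t).map (fun j => strOf (stF fd i up0 (a+1+j))), strOf (stF fd i up0 (a+t))) := by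
  intro t
  induction t with
  | zero =>
      intro a ha pre
      rw [PySem.List.pyRange_one_eq_nil (by omega)]
      simp
  | succ t ih =>
      intro a ha pre
      rw [PySem.List.pyRange_one_cons (by omega)]
      simp only [List.foldl_cons, aPathStep_strOf]
      have hst : sf fd i (stF fd i up0 a) (a:Int) = stF fd i up0 (a+1) := rfl
      rw [hst]
      have : ((a:Int) + 1) = ((a+1 : Nat) : Int) := by push_cast; ring
      rw [this, ih (a+1) (by omega), List.range_succ_eq_map]
      simp only [Prod.mk.injEq, List.map_map, Function.comp_def, List.map_cons,
        List.append_assoc, List.singleton_append]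
      have e2 : a + 1 + t = a + (t+1) := by omega
      rw [e2]
      refine ⟨?_, rfl⟩
      refine congrArg (pre ++ ·) (congrArg₂ List.cons (by norm_num) ?_)
      apply List.map_congr_left
      intro j _
      congr 2
      omega

-- the lookup characterisation of A's server_path
lemma trace_hsp (fd : List (String × List (String × Int))) (i n : Int) (up0 : Bool)
    (hup0 : up0 = decide (0 < fget fd "a0" (uName i 0))) :
    ∀ (j : Nat), (j:Int) < n →
      PySem.List.pyGetD
        (((PySem.List.pyRange 0 (n-1) 1).foldl (aPathStep fd i)
          ([if 0 < fget fd "a0" (uName i 0) then "upper" else "lower"],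
            if 0 < fget fd "a0" (uName i 0) then "upper" else "lower")).1)
        (j:Int) "" = strOf (stF fd i up0 j) := by
  intro j hj
  have hcur0 : (if 0 < fget fd "a0" (uName i 0) then "upper" else "lower")
      = strOf (stF fd i up0 0) := by
    rw [hup0]
    by_cases h : 0 < fget fd "a0" (uName i 0) <;> simp [stF, strOf, h]
  rw [hcur0, show ((0:Int)) = ((0:Nat):Int) by norm_num,
    path_fold fd i up0 (n-1) (n-1).toNat 0 (by simp) [strOf (stF fd i up0 0)]]
  rw [PySem.List.pyGetD_natCast]
  match j with
  | 0 => simp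
  | (j'+1) =>
      have hlt : j' < (n-1).toNat := by omega
      simp only [List.cons_append, List.nil_append, List.getD_cons_succ]
      rw [List.getD_eq_getElem?_getD, List.getElem?_map, List.getElem?_range hlt]
      simp only [Option.map_some, Option.getD_some]
      congr 2
      omega

-- per-step equality: A's inline dict updates = folding B's edge list
lemma emit_eq (fd : List (String × List (String × Int))) (i n : Int) (up0 : Bool)
    (sp : List String)
    (hsp : ∀ (j : Nat), (j:Int) < n → PySem.List.pyGetD sp (j:Int) "" = strOf (stF fd i up0 j))
    (j : Nat) (hj : (j:Int) < n) (d : PySem.Dict String (PySem.Dict String Int)) :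
    aEmit fd i n sp d (j:Int)
      = (bEdges fd i n j (prevOf fd i up0 j) (some (stF fd i up0 j))
          (bNext fd i n j (some (stF fd i up0 j)))).foldl (fun d e => setd d e.1 e.2) d := by
  have h0 := hsp j hj
  have hnx : bNext fd i n (j:Int) (some (stF fd i up0 j))
      = if (j:Int) < n - 1 then some (stF fd i up0 (j+1)) else none := by
    rw [bNext_some]; split_ifs <;> rfl
  have hc4 : ((0:Int) < (j:Int) ∧ PySem.List.pyGetD sp ((j:Int)-1) "" = "lower")
      ↔ ((0:Int) < (j:Int) ∧ prevOf fd i up0 j = some false) := by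
    by_cases hj0 : j = 0
    · subst hj0; simp
    · have hc : ((j:Int) - 1) = ((j-1 : Nat) : Int) := by omega
      rw [hc, hsp (j-1) (by omega)]
      simp only [prevOf, if_neg hj0]
      cases stF fd i up0 (j-1) <;> simp [strOf]
  have hc5 : (((j:Int)) < n-1 ∧ PySem.List.pyGetD sp ((j:Int)+1) "" = "lower")
      ↔ (((j:Int)) < n-1 ∧ bNext fd i n (j:Int) (some (stF fd i up0 j)) = some false) := by
    by_cases hlt : (j:Int) < n - 1
    · have hc : ((j:Int) + 1) = ((j+1 : Nat) : Int) := by omega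
      rw [hnx, hc, hsp (j+1) (by omega), if_pos hlt]
      cases stF fd i up0 (j+1) <;> simp [strOf]
    · simp [hlt]
  unfold aEmit bEdges
  rw [h0]
  simp only [hc4, hc5]
  cases hb : stF fd i up0 j
  · rw [if_neg (show ¬ strOf false = "upper" by decide),
      if_neg (show ¬ (some false : Option Bool) = some true by decide)]
    split_ifs <;> simp [List.foldl_append, List.foldl_cons, List.foldl_nil]
  · rw [if_pos (show strOf true = "upper" from rfl),
      if_pos (show (some true : Option Bool) = some true from rfl)]
    split_ifs <;> simp [List.foldl_append, List.foldl_cons, List.foldl_nil]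

-- A's rebuild fold equals folding the edge stream
lemma a_fold (fd : List (String × List (String × Int))) (i n : Int) (up0 : Bool)
    (sp : List String)
    (hsp : ∀ (j : Nat), (j:Int) < n → PySem.List.pyGetD sp (j:Int) "" = strOf (stF fd i up0 j)) :
    ∀ (t a : Nat), (n - (a:Int)).toNat = t → ∀ d,
      (PySem.List.pyRange a n 1).foldl (aEmit fd i n sp) d
        = (Efrom fd i n up0 t a).foldl (fun d e => setd d e.1 e.2) d := by
  intro t
  induction t with
  | zero =>
      intro a ha d
      rw [PySem.List.pyRange_one_eq_nil (by omega)]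
      simp [Efrom]
  | succ t ih =>
      intro a ha d
      rw [PySem.List.pyRange_one_cons (by omega)]
      simp only [List.foldl_cons]
      rw [emit_eq fd i n up0 sp hsp a (by omega) d, Efrom, List.foldl_append]
      have hcast : ((a:Int) + 1) = ((a+1 : Nat) : Int) := by push_cast; ring
      rw [hcast, ih (a+1) (by omega)]

-- B's single pass produces exactly the edge stream
lemma b_fold (fd : List (String × List (String × Int))) (i n : Int) (up0 : Bool) :
    ∀ (t a : Nat), (n - (a:Int)).toNat = t → ∀ (acc : List (String × String)),
      ((PySem.List.pyRange a n 1).foldl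
        (fun st k => (st.1 ++ bEdges fd i n k st.2.1 st.2.2 (bNext fd i n k st.2.2), st.2.2,
          bNext fd i n k st.2.2))
        (acc, prevOf fd i up0 a, some (stF fd i up0 a))).1
        = acc ++ Efrom fd i n up0 t a := by
  intro t
  induction t with
  | zero =>
      intro a ha acc
      rw [PySem.List.pyRange_one_eq_nil (by omega)]
      simp [Efrom]
  | succ t ih =>
      intro a ha acc
      rw [PySem.List.pyRange_one_cons (by omega)]
      simp only [List.foldl_cons]
      rw [Efrom, ← List.append_assoc]
      by_cases hlt : (a:Int) < n - 1
      · have hnx : bNext fd i n (a:Int) (some (stF fd i up0 a)) = some (stF fd i up0 (a+1)) := by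
          rw [bNext_some, if_pos hlt]; rfl
        have hpv : (some (stF fd i up0 a) : Option Bool) = prevOf fd i up0 (a+1) := by
          simp [prevOf]
        have hcast : ((a:Int) + 1) = ((a+1 : Nat) : Int) := by push_cast; ring
        rw [hnx, hpv, hcast, ih (a+1) (by omega)]
      · have hempty : PySem.List.pyRange ((a:Int)+1) n 1 = [] :=
          PySem.List.pyRange_one_eq_nil (by omega)
        have ht0 : t = 0 := by omega
        rw [hempty, ht0]
        simp [Efrom]

lemma server_eq (fd : List (String × List (String × Int))) (n : Int)
    (d : PySem.Dict String (PySem.Dict String Int)) (i : Int) :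
    aServer fd n d i = (bServer fd n i).foldl (fun d e => setd d e.1 e.2) d := by
  have key : ∀ (up0 : Bool) (sp : List String),
      (∀ (j : Nat), (j:Int) < n → PySem.List.pyGetD sp (j:Int) "" = strOf (stF fd i up0 j)) →
      (PySem.List.pyRange 0 n 1).foldl (aEmit fd i n sp) d
        = (((PySem.List.pyRange 0 n 1).foldl
            (fun st k => (st.1 ++ bEdges fd i n k st.2.1 st.2.2 (bNext fd i n k st.2.2), st.2.2,
              bNext fd i n k st.2.2))
            (([] : List (String × String)), (none : Option Bool), some up0)).1).foldl
            (fun d e => setd d e.1 e.2) d := by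
    intro up0 sp hsp
    have hinit : (([] : List (String × String)), (none : Option Bool), some up0)
        = (([] : List (String × String)), prevOf fd i up0 0, some (stF fd i up0 0)) := rfl
    have h0 : ((0:Int)) = ((0:Nat):Int) := by norm_num
    rw [hinit, h0, a_fold fd i n up0 sp hsp n.toNat 0 (by simp),
      b_fold fd i n up0 n.toNat 0 (by simp)]
    rfl
  exact key (decide (0 < fget fd "a0" (uName i 0))) _ (trace_hsp fd i n _ rfl)

lemma all_servers (fd : List (String × List (String × Int))) (n : Int) :
    ∀ (is : List Int) (d : PySem.Dict String (PySem.Dict String Int)),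
      is.foldl (aServer fd n) d
        = (is.flatMap (bServer fd n)).foldl (fun d e => setd d e.1 e.2) d := by
  intro is
  induction is with
  | nil => intro d; simp
  | cons i is ih =>
      intro d
      simp only [List.foldl_cons, List.flatMap_cons, List.foldl_append, ih, server_eq]

-- ===== VERDICT (by name: the statement is the Claim_ definition above) =====
theorem make_flow_consistent_py_spec : Claim_equal_make_flow_consistent_py := by
  intro fd m n tps _
  unfold Spec_make_flow_consistent_py make_flow_consistent_py make_flow_consistent_py_alt
  rw [PySem.List.foldl_append_eq_flatMap, all_servers]
  simp
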